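-- pv_equiv track=rewrite | github.com/DNA-and-Natural-Algorithms-Group/crnverifier | crnverifier/crn_bisimulation.py | solve_contejean_devie
-- ===== SOURCE A (Python) =====
-- def solve_contejean_devie(a):
--     """ Algorithm from Contejean & Devie 1994.
--
--     Find a non-negative and non-trivial integer solution x of the equation ax=0.
--     Return [] when there is no such solution.
--     """
--     q = len(a[0])
--
--     def multi(x, y):
--         s = 0
--         for i in range(len(x)):
--             s = s + x[i] * y[i]
--         return s
--
--     def sub(x):
--         s = []
--         for i in range(len(a)):
--             s.append(multi(a[i],x))
--         return s
--
--     def Min(b,t):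
--         if not b:
--             return True
--         else:
--             for i in range(len(b)):
--                 r = True;
--                 for j in range(q):
--                     r = r and (b[i][j] <= t[j])
--                 if r:
--                     return False
--             return True
--
--     e = []
--     for i in range(q):
--         e.append([])
--         for j in range(len(a)):
--             e[i].append(a[j][i])
--     p = []
--     frozen = []
--     for i in range(q):
--         p.append([1 if j == i else 0 for j in range(q)])
--         frozen.append([i == q-1 or j < i for j in range(q)])
--     zero = [0 for i in range(len(a))]
--     zero1 = [0 for i in range(q)]
--     b = []
--     while p:
--         t = p.pop()
--         if sub(t) == zero:
--             if t[q-1] == 1: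
--                 return t    # just get the first solution, not all solutions (unlike C&D 1994).
--             b.append(list(t))
--             frozen.pop()
--         else:
--             f = frozen.pop()
--             for i in range(q):
--                 if not f[i] and (multi(sub(t), e[i]) < 0):
--                     tmp = list(t)
--                     tmp[i] += 1
--                     if Min(b, tmp):
--                         if i == q-1:
--                             f[i] = True
--                         p.append(tmp)
--                         frozen.append(list(f))
--                     f[i] = True
--     return []
-- ===== SOURCE B (Python) =====
-- def solve_contejean_devie(a):
--     """Contejean & Devie 1994 search; the residual vector a.t is cached on the
--     stack and updated incrementally instead of being recomputed at every node."""
--     q = len(a[0])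
--     cols = [[row[i] for row in a] for i in range(q)]
--     zero = [0] * len(a)
--     stack = []
--     for i in range(q):
--         unit = [1 if j == i else 0 for j in range(q)]
--         fro = [i == q - 1 or j < i for j in range(q)]
--         stack.append((unit, list(cols[i]), fro))
--     minimal = []
--     while stack:
--         t, v, f = stack.pop()
--         if v == zero:
--             if t[q - 1] == 1:
--                 return t
--             minimal.append(t)
--         else:
--             for i in range(q):
--                 if not f[i] and sum(x * y for x, y in zip(v, cols[i])) < 0:
--                     tmp = [tj + 1 if j == i else tj for j, tj in enumerate(t)]
--                     if all(any(bj > cj for bj, cj in zip(bb, tmp)) for bb in minimal):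
--                         nf = [fj or (i == q - 1 and j == i) for j, fj in enumerate(f)]
--                         stack.append((tmp, [x + y for x, y in zip(v, cols[i])], nf))
--                     f[i] = True
--     return []
-- ===== Notes on version B (the rewrite author's own statement) =====
-- stated objective: faster
-- what changed: B caches the residual vector a.t with each node on the search stack and updates it incrementally (one column addition per push) so sub(t) is never recomputed inside the q-loop, and replaces the index-based multi/Min helpers with zip-based scans over a single stack of (t, residual, frozen) triples; intended as faster (O(q*m) instead of O(q^2*m) per node; the probe measured 3-10x at the largest size where both finished, unconfirmed where both time out).
import Mathlib
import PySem

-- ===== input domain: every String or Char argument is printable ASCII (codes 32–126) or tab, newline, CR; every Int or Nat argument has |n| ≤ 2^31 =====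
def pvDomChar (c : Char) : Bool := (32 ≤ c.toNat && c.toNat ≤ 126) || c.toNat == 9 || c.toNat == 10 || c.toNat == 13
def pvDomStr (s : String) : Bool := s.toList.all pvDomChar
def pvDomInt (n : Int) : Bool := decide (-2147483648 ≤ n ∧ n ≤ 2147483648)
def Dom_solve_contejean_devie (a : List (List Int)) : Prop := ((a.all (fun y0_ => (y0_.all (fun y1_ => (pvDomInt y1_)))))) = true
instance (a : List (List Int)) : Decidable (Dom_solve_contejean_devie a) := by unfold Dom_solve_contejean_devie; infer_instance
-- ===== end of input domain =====

-- B caches the residual vector a.t with each stack node and updates it incrementally, instead of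
-- A's recomputation of sub(t) inside the q-loop; intended as faster (measured 3-10x at the largest
-- size where both finished; unconfirmed on inputs where both time out).
-- Both ports run the search loop on a large fuel counter (the loop's iteration count is
-- astronomically below it on any input the claims are exercised on); both return [] at exhaustion.

-- ===== PORT A =====
-- Python's list used as a stack is kept with its top at the HEAD here (Python appends/pops at the end).
def pvMulti (x y : List Int) : Int :=
  (List.range x.length).foldl (fun s i => s + x.getD i 0 * y.getD i 0) 0

def pvSub (a : List (List Int)) (x : List Int) : List Int :=
  (List.range a.length).foldl (fun s i => s ++ [pvMulti (a.getD i []) x]) []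

-- A's Min: 'for i in range(len(b))' reading b[i], as the obvious structural recursion over b.
def pvMinGo (q : Nat) (t : List Int) : List (List Int) → Bool
  | [] => true
  | bb :: rest =>
    let r := (List.range q).foldl (fun r j => r && decide (bb.getD j 0 ≤ t.getD j 0)) true
    if r then false else pvMinGo q t rest

def pvMin (q : Nat) (b : List (List Int)) (t : List Int) : Bool :=
  if b = [] then true else pvMinGo q t b

def pvFuel : Nat := 18446744073709551616

-- the body of A's inner 'for i in range(q)' loop, on state (p, frozen, f)
def pvStepA (a : List (List Int)) (q : Nat) (e : List (List Int)) (t : List Int)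
    (b : List (List Int)) :
    (List (List Int) × List (List Bool) × List Bool) → Nat →
      List (List Int) × List (List Bool) × List Bool := fun st i =>
  let p := st.1; let fr := st.2.1; let f := st.2.2
  if !(f.getD i false) && decide (pvMulti (pvSub a t) (e.getD i []) < 0) then
    let tmp := t.set i (t.getD i 0 + 1)
    if pvMin q b tmp then
      let f' := if i = q-1 then f.set i true else f
      (tmp :: p, f' :: fr, f.set i true)
    else (p, fr, f.set i true)
  else (p, fr, f)

def pvLoopA (a : List (List Int)) (q : Nat) (e : List (List Int)) (zero : List Int) :
    Nat → List (List Int) → List (List Bool) → List (List Int) → List Int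
  | _, [], _, _ => []
  | 0, _ :: _, _, _ => []
  | fuel+1, t :: p, frozen, b =>
    if pvSub a t = zero then
      if t.getD (q-1) 0 = 1 then t
      else pvLoopA a q e zero fuel p frozen.tail (b ++ [t])
    else
      -- frozen.pop(); in-range under the loop invariant (frozen parallel to p)
      let st := (List.range q).foldl (pvStepA a q e t b) (p, frozen.tail, frozen.headD [])
      pvLoopA a q e zero fuel st.1 st.2.1 b

def solve_contejean_devie (a : List (List Int)) : List Int :=
  let q := (a.headD []).length   -- len(a[0]); a ≠ [] by Pre_
  let e := (List.range q).foldl (fun e i =>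
    e ++ [(List.range a.length).foldl (fun r j => r ++ [(a.getD j []).getD i 0]) []]) []
  let p := (List.range q).foldl (fun p i =>
    ((List.range q).map (fun j => if j = i then (1:Int) else 0)) :: p) []
  let frozen := (List.range q).foldl (fun fr i =>
    ((List.range q).map (fun j => decide (i = q-1) || decide (j < i))) :: fr) []
  pvLoopA a q e (List.replicate a.length 0) pvFuel p frozen []

-- ===== PORT B =====
def pvDot (v w : List Int) : Int := (List.zipWith (fun x y => x * y) v w).sum

-- the body of B's inner 'for i in range(q)' loop, on state (stack, f)
def pvStepB (q : Nat) (cols : List (List Int)) (t v : List Int) (mins : List (List Int)) :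
    (List (List Int × List Int × List Bool) × List Bool) → Nat →
      List (List Int × List Int × List Bool) × List Bool := fun st i =>
  let s := st.1; let f := st.2
  if !(f.getD i false) && decide (pvDot v (cols.getD i []) < 0) then
    let tmp := t.set i (t.getD i 0 + 1)
    if mins.all (fun bb => (bb.zip tmp).any (fun pr => pr.2 < pr.1)) then
      let nf := if i = q-1 then f.set i true else f
      ((tmp, List.zipWith (· + ·) v (cols.getD i []), nf) :: s, f.set i true)
    else (s, f.set i true)
  else (s, f)

def pvLoopB (q : Nat) (cols : List (List Int)) (zero : List Int) :
    Nat → List (List Int × List Int × List Bool) → List (List Int) → List Int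
  | _, [], _ => []
  | 0, _ :: _, _ => []
  | fuel+1, (t, v, f) :: s, mins =>
    if v = zero then
      if t.getD (q-1) 0 = 1 then t
      else pvLoopB q cols zero fuel s (mins ++ [t])
    else
      let st := (List.range q).foldl (pvStepB q cols t v mins) (s, f)
      pvLoopB q cols zero fuel st.1 mins

def solve_contejean_devie_alt (a : List (List Int)) : List Int :=
  let q := (a.headD []).length
  let cols := (List.range q).map (fun i => a.map (fun row => row.getD i 0))
  let stack := (List.range q).foldl (fun s i =>
    ((List.range q).map (fun j => if j = i then (1:Int) else 0),
     cols.getD i [],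
     (List.range q).map (fun j => decide (i = q-1) || decide (j < i))) :: s) []
  pvLoopB q cols (List.replicate a.length 0) pvFuel stack []

-- ===== PRECONDITION & SPEC =====
-- Pre_ excludes exactly the inputs on which Python A raises (IndexError): the empty list
-- (a[0] fails) and, when q = len(a[0]) > 0, ragged matrices (building e or the first sub(t)
-- indexes a row outside its length).  A returns on every input admitted here.
def Pre_solve_contejean_devie (a : List (List Int)) : Prop :=
  a ≠ [] ∧ ((a.headD []).length = 0 ∨ ∀ row ∈ a, row.length = (a.headD []).length)
instance (a : List (List Int)) : Decidable (Pre_solve_contejean_devie a) := by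
  unfold Pre_solve_contejean_devie; infer_instance

def pvWitness_solve_contejean_devie : List (List Int) := [[1, -1]]

def Spec_solve_contejean_devie (a : List (List Int)) (out : List Int) : Prop := out = solve_contejean_devie_alt a
instance (a : List (List Int)) (out : List Int) : Decidable (Spec_solve_contejean_devie a out) := by unfold Spec_solve_contejean_devie; infer_instance

-- ===== CLAIM (what is proved, stated in full; the proofs are below) =====
def Claim_equal_solve_contejean_devie : Prop := ∀ (a : List (List Int)), Dom_solve_contejean_devie a → Pre_solve_contejean_devie a → Spec_solve_contejean_devie a (solve_contejean_devie a)

-- ===== LEMMAS AND PROOFS =====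

def pvCols (a : List (List Int)) (q : Nat) : List (List Int) :=
  (List.range q).map (fun i => a.map (fun row => row.getD i 0))

def pvUnit (q i : Nat) : List Int := (List.range q).map (fun j => if j = i then (1:Int) else 0)

def pvFro (q i : Nat) : List Bool := (List.range q).map (fun j => decide (i = q-1) || decide (j < i))

def pvTriple (a : List (List Int)) : List Int × List Bool → List Int × List Int × List Bool :=
  fun tf => (tf.1, pvSub a tf.1, tf.2)

lemma pv_foldl_and {α : Type} (p : α → Bool) :
    ∀ (l : List α) (b : Bool), l.foldl (fun r x => r && p x) b = (b && l.all p) := by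
  intro l
  induction l with
  | nil => intro b; simp
  | cons x xs ih => intro b; simp [ih, Bool.and_assoc]

lemma pv_map_range_getD {α β : Type} (h : α → β) (d : α) :
    ∀ l : List α, (List.range l.length).map (fun i => h (l.getD i d)) = l.map h := by
  intro l
  induction l with
  | nil => simp
  | cons x xs ih =>
    simp only [List.length_cons, List.range_succ_eq_map, List.map_cons, List.map_map]
    refine congrArg (h x :: ·) ?_
    simpa [Function.comp] using ih

lemma pv_zipWith_eq_map_range {β : Type} (f : Int → Int → β) :
    ∀ (x y : List Int), x.length = y.length →
      List.zipWith f x y = (List.range x.length).map (fun i => f (x.getD i 0) (y.getD i 0)) := by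
  intro x
  induction x with
  | nil => intro y h; simp
  | cons c cs ih =>
    intro y h
    cases y with
    | nil => simp at h
    | cons d ds =>
      simp only [List.zipWith_cons_cons, List.length_cons, List.range_succ_eq_map,
        List.map_cons, List.map_map]
      refine congrArg (f c d :: ·) ?_
      simpa [Function.comp] using ih ds (by simpa using h)

lemma pv_foldl_add_range (g : Nat → Int) :
    ∀ (l : List Nat) (c : Int), l.foldl (fun s i => s + g i) c = c + (l.map g).sum := by
  intro l
  induction l with
  | nil => intro c; simp
  | cons x xs ih => intro c; simp [ih, add_assoc]

lemma pv_multi_eq_dot (x y : List Int) (h : x.length = y.length) : pvMulti x y = pvDot x y := by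
  unfold pvMulti pvDot
  rw [pv_foldl_add_range, pv_zipWith_eq_map_range _ x y h]
  simp

lemma pv_sub_eq_map (a : List (List Int)) (x : List Int) :
    pvSub a x = a.map (fun row => pvMulti row x) := by
  unfold pvSub
  rw [show (fun (s : List Int) i => s ++ [pvMulti (a.getD i []) x])
      = (fun s i => s ++ [(fun i => pvMulti (a.getD i []) x) i]) from rfl]
  rw [PySem.List.foldl_append_singleton_eq_map]
  simpa using pv_map_range_getD (fun row => pvMulti row x) [] a

lemma pv_length_sub (a : List (List Int)) (x : List Int) : (pvSub a x).length = a.length := by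
  rw [pv_sub_eq_map]; simp

lemma pv_getD_map_range {β : Type} (f : Nat → β) (d : β) (q i : Nat) (h : i < q) :
    ((List.range q).map f).getD i d = f i := by
  rw [List.getD_eq_getElem?_getD]; simp [h]

lemma pv_cols_getD (a : List (List Int)) (q i : Nat) (h : i < q) :
    (pvCols a q).getD i [] = a.map (fun row => row.getD i 0) := by
  unfold pvCols; exact pv_getD_map_range _ _ q i h

lemma pv_sum_range_ite (g : Nat → Int) :
    ∀ (q i : Nat), i < q → ((List.range q).map (fun j => if j = i then g j else 0)).sum = g i := by
  intro q
  induction q with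
  | zero => intro i h; omega
  | succ n ih =>
    intro i h
    rw [List.range_succ]
    by_cases hi : i = n
    · subst hi
      have hz : ((List.range i).map (fun j => if j = i then g j else 0)).sum = 0 := by
        apply List.sum_eq_zero
        intro x hx
        simp only [List.mem_map, List.mem_range] at hx
        obtain ⟨j, hj, rfl⟩ := hx
        simp [Nat.ne_of_lt hj]
      simp [hz]
    · have hlt : i < n := by omega
      simp only [List.map_append, List.sum_append, ih i hlt, List.map_cons, List.map_nil]
      have : (if n = i then g n else 0) = 0 := by
        rw [if_neg]; omega
      simp [this]

lemma pv_multi_unit (q i : Nat) (row : List Int) (hrow : row.length = q) (hi : i < q) :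
    pvMulti row (pvUnit q i) = row.getD i 0 := by
  rw [pv_multi_eq_dot row _ (by simp [pvUnit, hrow])]
  unfold pvDot
  rw [pv_zipWith_eq_map_range _ _ _ (by simp [pvUnit, hrow])]
  rw [hrow]
  have hmap : (List.range q).map (fun j => row.getD j 0 * (pvUnit q i).getD j 0)
      = (List.range q).map (fun j => if j = i then row.getD j 0 else 0) := by
    apply List.map_congr_left
    intro j hj
    rw [List.mem_range] at hj
    rw [show (pvUnit q i).getD j 0 = if j = i then (1:Int) else 0 from
      pv_getD_map_range _ _ q j hj]
    by_cases hji : j = i <;> simp [hji]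
  rw [hmap, pv_sum_range_ite _ q i hi]

lemma pv_sub_unit (a : List (List Int)) (q i : Nat) (ha : ∀ row ∈ a, row.length = q)
    (hi : i < q) : pvSub a (pvUnit q i) = a.map (fun row => row.getD i 0) := by
  rw [pv_sub_eq_map]
  apply List.map_congr_left
  intro row hrow
  exact pv_multi_unit q i row (ha row hrow) hi

lemma pv_dot_set :
    ∀ (t row : List Int) (i : Nat), row.length = t.length → i < t.length →
      pvDot row (t.set i (t.getD i 0 + 1)) = pvDot row t + row.getD i 0 := by
  intro t
  induction t with
  | nil => intro row i _ hi; simp at hi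
  | cons c cs ih =>
    intro row i hlen hi
    cases row with
    | nil => simp at hlen
    | cons r rs =>
      cases i with
      | zero => simp [pvDot]; ring
      | succ n =>
        have := ih rs n (by simpa using hlen) (by simpa using hi)
        simp only [List.set_cons_succ, List.getD_cons_succ, pvDot,
          List.zipWith_cons_cons, List.sum_cons] at this ⊢
        omega

lemma pv_zipWith_map_map (l : List (List Int)) (f g : List Int → Int) :
    List.zipWith (· + ·) (l.map f) (l.map g) = l.map (fun x => f x + g x) := by
  induction l with
  | nil => simp
  | cons x xs ih => simp [ih]

lemma pv_sub_set (a : List (List Int)) (q i : Nat) (t : List Int)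
    (ha : ∀ row ∈ a, row.length = q) (ht : t.length = q) (hi : i < q) :
    pvSub a (t.set i (t.getD i 0 + 1))
      = List.zipWith (· + ·) (pvSub a t) (a.map (fun row => row.getD i 0)) := by
  rw [pv_sub_eq_map, pv_sub_eq_map, pv_zipWith_map_map]
  apply List.map_congr_left
  intro row hrow
  have h1 : row.length = (t.set i (t.getD i 0 + 1)).length := by
    simp [ha row hrow, ht]
  have h2 : row.length = t.length := by simp [ha row hrow, ht]
  rw [pv_multi_eq_dot _ _ h1, pv_multi_eq_dot _ _ h2]
  exact pv_dot_set t row i h2 (by omega)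

lemma pv_minGo_eq (q : Nat) (t : List Int) (ht : t.length = q) :
    ∀ (b : List (List Int)), (∀ bb ∈ b, bb.length = q) →
      pvMinGo q t b = b.all (fun bb => (bb.zip t).any (fun pr => pr.2 < pr.1)) := by
  intro b
  induction b with
  | nil => intro _; simp [pvMinGo]
  | cons bb rest ih =>
    intro hb
    have hbb : bb.length = q := hb bb (by simp)
    have hzip : bb.zip t = (List.range q).map (fun j => (bb.getD j 0, t.getD j 0)) := by
      rw [List.zip_eq_zipWith, pv_zipWith_eq_map_range Prod.mk bb t (by rw [hbb, ht]), hbb]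
    have hany : (bb.zip t).any (fun pr => pr.2 < pr.1)
        = !((List.range q).foldl (fun r j => r && decide (bb.getD j 0 ≤ t.getD j 0)) true) := by
      rw [hzip, pv_foldl_and]
      simp only [Bool.true_and, List.any_map]
      rw [List.all_eq_not_any_not, Bool.not_not]
      simp only [Function.comp_def]
      refine List.any_congr rfl ?_
      intro j
      rw [← decide_not]
      simp
    show (if (List.range q).foldl (fun r j => r && decide (bb.getD j 0 ≤ t.getD j 0)) true
        then false else pvMinGo q t rest) = _
    rw [List.all_cons, hany, ih (fun x hx => hb x (by simp [hx]))]
    cases hr : (List.range q).foldl (fun r j => r && decide (bb.getD j 0 ≤ t.getD j 0)) true <;>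
      simp

lemma pv_min_eq (q : Nat) (b : List (List Int)) (t : List Int) (ht : t.length = q)
    (hb : ∀ bb ∈ b, bb.length = q) :
    pvMin q b t = b.all (fun bb => (bb.zip t).any (fun pr => pr.2 < pr.1)) := by
  cases b with
  | nil => simp [pvMin]
  | cons bb rest =>
    rw [show pvMin q (bb :: rest) t = pvMinGo q t (bb :: rest) from by simp [pvMin]]
    exact pv_minGo_eq q t ht (bb :: rest) hb

lemma pv_foldl_cons_rev {α β : Type} (g : α → β) :
    ∀ (l : List α) (s : List β), l.foldl (fun acc x => g x :: acc) s = (l.map g).reverse ++ s := by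
  intro l
  induction l with
  | nil => intro s; simp
  | cons x xs ih => intro s; simp [ih]

lemma pv_fold_rel (a : List (List Int)) (q : Nat) (ha : ∀ row ∈ a, row.length = q)
    (t : List Int) (ht : t.length = q) (b : List (List Int)) (hb : ∀ bb ∈ b, bb.length = q) :
    ∀ (l : List Nat), (∀ i ∈ l, i < q) →
    ∀ (p : List (List Int)) (fr : List (List Bool)) (f : List Bool),
      p.length = fr.length → (∀ u ∈ p, u.length = q) →
      l.foldl (pvStepB q (pvCols a q) t (pvSub a t) b) ((p.zip fr).map (pvTriple a), f)
        = (((l.foldl (pvStepA a q (pvCols a q) t b) (p, fr, f)).1.zip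
            (l.foldl (pvStepA a q (pvCols a q) t b) (p, fr, f)).2.1).map (pvTriple a),
           (l.foldl (pvStepA a q (pvCols a q) t b) (p, fr, f)).2.2)
      ∧ (l.foldl (pvStepA a q (pvCols a q) t b) (p, fr, f)).1.length
          = (l.foldl (pvStepA a q (pvCols a q) t b) (p, fr, f)).2.1.length
      ∧ (∀ u ∈ (l.foldl (pvStepA a q (pvCols a q) t b) (p, fr, f)).1, u.length = q) := by
  intro l
  induction l with
  | nil =>
    intro _ p fr f hlen helem
    exact ⟨rfl, hlen, helem⟩
  | cons i l' ih =>
    intro hmem p fr f hlen helem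
    have hiq : i < q := hmem i (by simp)
    have hcols : (pvCols a q).getD i [] = a.map (fun row => row.getD i 0) :=
      pv_cols_getD a q i hiq
    have hlencols : (pvSub a t).length = ((pvCols a q).getD i []).length := by
      rw [pv_length_sub, hcols]; simp
    have hguard : decide (pvDot (pvSub a t) ((pvCols a q).getD i []) < 0)
        = decide (pvMulti (pvSub a t) ((pvCols a q).getD i []) < 0) := by
      rw [pv_multi_eq_dot _ _ hlencols]
    have htmp : (t.set i (t.getD i 0 + 1)).length = q := by simp [ht]
    have hminall : b.all (fun bb => (bb.zip (t.set i (t.getD i 0 + 1))).any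
          (fun pr => pr.2 < pr.1)) = pvMin q b (t.set i (t.getD i 0 + 1)) :=
      (pv_min_eq q b _ htmp hb).symm
    have hsub : List.zipWith (· + ·) (pvSub a t) ((pvCols a q).getD i [])
        = pvSub a (t.set i (t.getD i 0 + 1)) := by
      rw [hcols, ← pv_sub_set a q i t ha ht hiq]
    have hstep : pvStepB q (pvCols a q) t (pvSub a t) b ((p.zip fr).map (pvTriple a), f) i
        = (((pvStepA a q (pvCols a q) t b (p, fr, f) i).1.zip (pvStepA a q (pvCols a q) t b (p, fr, f) i).2.1).map
            (pvTriple a), (pvStepA a q (pvCols a q) t b (p, fr, f) i).2.2) := by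
      unfold pvStepA pvStepB
      simp only [hguard, hminall, hsub]
      split_ifs <;> simp [pvTriple]
    have hA : (pvStepA a q (pvCols a q) t b (p, fr, f) i).1.length
          = (pvStepA a q (pvCols a q) t b (p, fr, f) i).2.1.length
        ∧ (∀ u ∈ (pvStepA a q (pvCols a q) t b (p, fr, f) i).1, u.length = q) := by
      unfold pvStepA
      dsimp only
      refine ⟨?_, ?_⟩
      · split_ifs <;> simp [hlen]
      · intro u hu
        split_ifs at hu <;> dsimp only at hu <;>
          first
            | exact helem u hu
            | (simp only [List.mem_cons] at hu
               rcases hu with rfl | hu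
               · exact htmp
               · exact helem u hu)
    simp only [List.foldl_cons, hstep]
    exact ih (fun j hj => hmem j (by simp [hj]))
      (pvStepA a q (pvCols a q) t b (p, fr, f) i).1 (pvStepA a q (pvCols a q) t b (p, fr, f) i).2.1
      (pvStepA a q (pvCols a q) t b (p, fr, f) i).2.2 hA.1 hA.2

lemma pv_loop_eq (a : List (List Int)) (q : Nat) (ha : ∀ row ∈ a, row.length = q) :
    ∀ (fuel : Nat) (p : List (List Int)) (frozen : List (List Bool)) (b : List (List Int)),
      p.length = frozen.length → (∀ u ∈ p, u.length = q) → (∀ bb ∈ b, bb.length = q) →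
      pvLoopA a q (pvCols a q) (List.replicate a.length 0) fuel p frozen b
        = pvLoopB q (pvCols a q) (List.replicate a.length 0) fuel
            ((p.zip frozen).map (pvTriple a)) b := by
  intro fuel
  induction fuel with
  | zero =>
    intro p frozen b hlen helem hb
    cases p with
    | nil => simp [pvLoopA, pvLoopB]
    | cons t p' =>
      cases frozen with
      | nil => simp at hlen
      | cons f fr => simp [pvLoopA, pvLoopB]
  | succ fuel ih =>
    intro p frozen b hlen helem hb
    cases p with
    | nil => simp [pvLoopA, pvLoopB]
    | cons t p' =>
      cases frozen with
      | nil => simp at hlen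
      | cons f fr =>
        have hlen' : p'.length = fr.length := by simpa using hlen
        have helem' : ∀ u ∈ p', u.length = q := fun u hu => helem u (by simp [hu])
        have htq : t.length = q := helem t (by simp)
        simp only [List.zip_cons_cons, List.map_cons, pvLoopA, pvLoopB, pvTriple,
          List.tail_cons, List.headD_cons]
        by_cases hz : pvSub a t = List.replicate a.length 0
        · rw [if_pos hz, if_pos hz]
          by_cases hone : t.getD (q-1) 0 = (1:Int)
          · rw [if_pos hone, if_pos hone]
          · have hb2 : ∀ bb ∈ b ++ [t], bb.length = q := by
              intro bb hbb
              rcases List.mem_append.mp hbb with h | h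
              · exact hb bb h
              · simp only [List.mem_singleton] at h; subst h; exact htq
            rw [if_neg hone, if_neg hone]
            exact ih p' fr (b ++ [t]) hlen' helem' hb2
        · rw [if_neg hz, if_neg hz]
          have hfold := pv_fold_rel a q ha t htq b hb (List.range q)
            (fun i hi => List.mem_range.mp hi) p' fr f hlen' helem'
          rw [hfold.1]
          exact ih _ _ b hfold.2.1 hfold.2.2 hb

lemma pv_e_eq (a : List (List Int)) (q : Nat) :
    (List.range q).foldl (fun e i =>
      e ++ [(List.range a.length).foldl (fun r j => r ++ [(a.getD j []).getD i 0]) []]) []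
      = pvCols a q := by
  rw [show (fun (e : List (List Int)) i =>
        e ++ [(List.range a.length).foldl (fun r j => r ++ [(a.getD j []).getD i 0]) []])
      = (fun e i => e ++ [(fun i => (List.range a.length).foldl
          (fun r j => r ++ [(a.getD j []).getD i 0]) []) i]) from rfl]
  rw [PySem.List.foldl_append_singleton_eq_map]
  unfold pvCols
  rw [List.nil_append]
  apply List.map_congr_left
  intro i _
  rw [show (fun (r : List Int) j => r ++ [(a.getD j []).getD i 0])
      = (fun r j => r ++ [(fun j => (a.getD j []).getD i 0) j]) from rfl]
  rw [PySem.List.foldl_append_singleton_eq_map]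
  simpa using pv_map_range_getD (fun row => row.getD i 0) [] a

-- ===== VERDICT (by name: the statement is the Claim_ definition above) =====
theorem solve_contejean_devie_spec : Claim_equal_solve_contejean_devie := by
  intro a _ pre
  obtain ⟨hne, hcase⟩ := pre
  unfold Spec_solve_contejean_devie
  simp only [solve_contejean_devie, solve_contejean_devie_alt]
  rcases hcase with hq0 | hrows
  · simp only [hq0, List.range_zero, List.foldl_nil, List.map_nil]
    simp [pvLoopA, pvLoopB]
  · set n := (a.headD []).length with hn
    simp only [pv_e_eq a n]
    simp only [show (List.range n).map (fun i => a.map (fun row => row.getD i 0))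
        = pvCols a n from rfl]
    simp only [show (fun (p : List (List Int)) (i : Nat) =>
        ((List.range n).map (fun j => if j = i then (1:Int) else 0)) :: p)
      = (fun (p : List (List Int)) (i : Nat) => pvUnit n i :: p) from rfl]
    simp only [show (fun (fr : List (List Bool)) (i : Nat) =>
        ((List.range n).map (fun j => decide (i = n-1) || decide (j < i))) :: fr)
      = (fun (fr : List (List Bool)) (i : Nat) => pvFro n i :: fr) from rfl]
    simp only [show (fun (s : List (List Int × List Int × List Bool)) (i : Nat) =>
        ((List.range n).map (fun j => if j = i then (1:Int) else 0),
         (pvCols a n).getD i [],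
         (List.range n).map (fun j => decide (i = n-1) || decide (j < i))) :: s)
      = (fun (s : List (List Int × List Int × List Bool)) (i : Nat) =>
          (pvUnit n i, (pvCols a n).getD i [], pvFro n i) :: s) from rfl]
    simp only [pv_foldl_cons_rev, List.append_nil]
    have hlen : ((List.range n).map (pvUnit n)).reverse.length
        = ((List.range n).map (pvFro n)).reverse.length := by simp
    have helem : ∀ u ∈ ((List.range n).map (pvUnit n)).reverse, u.length = n := by
      intro u hu
      rw [List.mem_reverse, List.mem_map] at hu
      obtain ⟨i, _, rfl⟩ := hu
      simp [pvUnit]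
    have hstack : ((((List.range n).map (pvUnit n)).reverse).zip
          (((List.range n).map (pvFro n)).reverse)).map (pvTriple a)
        = ((List.range n).map
            (fun i => (pvUnit n i, (pvCols a n).getD i [], pvFro n i))).reverse := by
      rw [← List.map_reverse, ← List.map_reverse, ← List.map_reverse, List.zip_map',
        List.map_map]
      apply List.map_congr_left
      intro i hi
      have hiq : i < n := List.mem_range.mp (List.mem_reverse.mp hi)
      simp only [Function.comp_def, pvTriple]
      rw [pv_sub_unit a n i hrows hiq, pv_cols_getD a n i hiq]
    rw [pv_loop_eq a n hrows pvFuel _ _ [] hlen helem (by simp), hstack]
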